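-- pv_equiv track=rewrite | github.com/kevinye2/cs4300sp2020-aak85-dh558-ks963-ky242-lp398 | app/irsystem/data_handlers/redditdata.py | granularClean
-- ===== SOURCE A (Python) =====
-- def granularClean(whole_text):
--     bad_list = [
--         'grade',
--         'gpa',
--         'g.p.a',
--         'class',
--         ' cs ',
--         'computer science',
--         'engineering',
--         'arts',
--         'sciences',
--         'physics',
--         'homework',
--         'assignment',
--         'math',
--         'project',
--         'professor',
--         'teacher',
--     ]
--     for w in bad_list:
--         if w in whole_text.lower():
--             return False
--     return True
-- ===== SOURCE B (Python) =====
-- def granularClean(whole_text):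
--     bad_list = [
--         'grade',
--         'gpa',
--         'g.p.a',
--         'class',
--         ' cs ',
--         'computer science',
--         'engineering',
--         'arts',
--         'sciences',
--         'physics',
--         'homework',
--         'assignment',
--         'math',
--         'project',
--         'professor',
--         'teacher',
--     ]
--     t = whole_text.lower()
--     for i in range(len(t)):
--         if any(t.startswith(w, i) for w in bad_list):
--             return False
--     return True
-- ===== Notes on version B (the rewrite author's own statement) =====
-- stated objective: alternative
-- what changed: Position-major single left-to-right scan checking whether any banned word starts at each position, instead of 16 independent word-major substring searches over the text.
import Mathlib
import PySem

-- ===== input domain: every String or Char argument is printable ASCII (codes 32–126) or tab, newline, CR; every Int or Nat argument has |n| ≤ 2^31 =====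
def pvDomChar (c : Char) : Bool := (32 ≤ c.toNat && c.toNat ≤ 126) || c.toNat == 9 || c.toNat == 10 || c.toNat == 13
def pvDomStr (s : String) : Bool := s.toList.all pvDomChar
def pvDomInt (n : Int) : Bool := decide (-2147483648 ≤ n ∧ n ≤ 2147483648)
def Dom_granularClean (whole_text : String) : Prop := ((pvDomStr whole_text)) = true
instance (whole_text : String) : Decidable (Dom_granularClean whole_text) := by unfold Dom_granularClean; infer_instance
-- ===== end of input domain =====

-- B replaces A's 16 independent word-major substring searches by one position-major
-- left-to-right scan checking whether any banned word starts at each position (alternative).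


-- ===== PORT A =====
def pvBadList : List String :=
  ["grade", "gpa", "g.p.a", "class", " cs ", "computer science", "engineering",
   "arts", "sciences", "physics", "homework", "assignment", "math", "project",
   "professor", "teacher"]

-- A's loop: first banned word found in the lowered text returns False, else True
def pvALoop (ws : List String) (whole_text : String) : Bool :=
  match ws with
  | [] => true
  | w :: rest =>
      if PySem.Str.isIn w (PySem.Str.lower whole_text) then false else pvALoop rest whole_text

def granularClean (whole_text : String) : Bool := pvALoop pvBadList whole_text

-- ===== PORT B =====
-- B's scan: for each position i (each suffix of the lowered text), does any banned word start here?
def pvBLoop (ws : List (List Char)) (t : List Char) : Bool :=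
  match t with
  | [] => true
  | c :: rest =>
      if ws.any (fun w => PySem.Chars.startswith (c :: rest) w) then false else pvBLoop ws rest

def granularClean_alt (whole_text : String) : Bool :=
  pvBLoop (pvBadList.map String.toList) (PySem.Chars.lower whole_text.toList)

-- ===== PRECONDITION & SPEC =====
def Spec_granularClean (whole_text : String) (out : Bool) : Prop := out = granularClean_alt whole_text
instance (whole_text : String) (out : Bool) : Decidable (Spec_granularClean whole_text out) := by unfold Spec_granularClean; infer_instance

-- ===== CLAIM (what is proved, stated in full; the proofs are below) =====
def Claim_equal_granularClean : Prop := ∀ (whole_text : String), Dom_granularClean whole_text → Spec_granularClean whole_text (granularClean whole_text)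

-- ===== LEMMAS AND PROOFS =====

-- 'w in s' is false iff w is not an infix (String-level form of Chars.isIn_eq_false_iff)
theorem pvStr_isIn_eq_false_iff (sub s : String) :
    PySem.Str.isIn sub s = false ↔ ¬ (sub.toList <:+: s.toList) := by
  simp only [PySem.Str.isIn_eq]
  exact PySem.Chars.isIn_eq_false_iff sub.toList s.toList

-- A's loop returns true iff no listed word is an infix of the lowered text
theorem pvALoop_true_iff (ws : List String) (s : String) :
    pvALoop ws s = true ↔ ∀ w ∈ ws, ¬ (w.toList <:+: (PySem.Chars.lower s.toList)) := by
  induction ws with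
  | nil => simp [pvALoop]
  | cons w rest ih =>
      simp only [pvALoop]
      cases hb : PySem.Str.isIn w (PySem.Str.lower s) with
      | true =>
          rw [PySem.Str.isIn_iff_infix, PySem.Str.toList_lower] at hb
          simp [hb]
      | false =>
          rw [pvStr_isIn_eq_false_iff, PySem.Str.toList_lower] at hb
          simp only [if_false, ih, List.mem_cons, Bool.false_eq_true]
          constructor
          · rintro h2 x (rfl | hx)
            · exact hb
            · exact h2 x hx
          · intro h2 x hx; exact h2 x (Or.inr hx)

-- B's scan returns true iff no listed (nonempty) word is an infix of the text
theorem pvBLoop_true_iff (ws : List (List Char)) (t : List Char)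
    (hne : ∀ w ∈ ws, w ≠ []) :
    pvBLoop ws t = true ↔ ∀ w ∈ ws, ¬ (w <:+: t) := by
  induction t with
  | nil =>
      simp only [pvBLoop, true_iff]
      intro w hw hinf
      exact hne w hw (List.eq_nil_of_infix_nil hinf)
  | cons c rest ih =>
      simp only [pvBLoop]
      cases h : ws.any (fun w => PySem.Chars.startswith (c :: rest) w) with
      | true =>
          simp only [if_true]
          rcases List.any_eq_true.mp h with ⟨w, hw, hsw⟩
          constructor
          · intro hfalse; cases hfalse
          · intro h2
            exact absurd (((PySem.Chars.startswith_iff _ _).mp hsw).isInfix) (h2 w hw)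
      | false =>
          rw [List.any_eq_false] at h
          simp only [if_false, ih, Bool.false_eq_true]
          constructor
          · intro h2 w hw hinf
            rcases List.infix_cons_iff.mp hinf with hpre | hinf
            · exact absurd ((PySem.Chars.startswith_iff _ _).mpr hpre) (by simp [h w hw])
            · exact h2 w hw hinf
          · intro h2 w hw hinf
            exact h2 w hw (List.infix_cons hinf)

-- ===== VERDICT (by name: the statement is the Claim_ definition above) =====
theorem granularClean_spec : Claim_equal_granularClean := by
  intro s _
  unfold Spec_granularClean granularClean granularClean_alt
  have hne : ∀ w ∈ pvBadList.map String.toList, w ≠ [] := by decide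
  rw [Bool.eq_iff_iff, pvALoop_true_iff, pvBLoop_true_iff _ _ hne]
  constructor
  · intro h w hw
    rcases List.mem_map.mp hw with ⟨w', hw', rfl⟩
    exact h w' hw'
  · intro h w hw
    exact h w.toList (List.mem_map.mpr ⟨w, hw, rfl⟩)
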